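-- pv_equiv track=rewrite | github.com/ljm0850/algo-problem | baekjoon/16120 PPAP.py | solution
-- ===== SOURCE A (Python) =====
-- def solution(Target:str):
--     if Target == 'P' or Target == 'PPAP':
--         return True
--     ls = []
--     ppap = ['P','P','A','P']
--     for t in Target:
--         ls.append(t)
--         if ls[-4:] == ppap:
--             for _ in range(3):
--                 ls.pop()
--     if ls == ['P'] or ls == ppap:
--         return True
--     return False
-- ===== SOURCE B (Python) =====
-- def solution(Target: str):
--     # One-pass counter automaton: track the number of trailing 'P's on the
--     # (virtual) stack and whether an 'A' is awaiting its closing 'P'.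
--     cnt = 0
--     pending = False
--     for c in Target:
--         if pending:
--             if c == 'P':
--                 cnt -= 1
--                 pending = False
--             else:
--                 return False
--         elif c == 'P':
--             cnt += 1
--         elif c == 'A':
--             if cnt >= 2:
--                 pending = True
--             else:
--                 return False
--         else:
--             return False
--     return (not pending) and cnt == 1
-- ===== Notes on version B (the rewrite author's own statement) =====
-- stated objective: simpler
-- what changed: Replaces A's explicit character stack with repeated 'PPAP' suffix-slice comparison and pops by a one-pass counter automaton that tracks only the number of trailing 'P's and a pending-'A' flag, rejecting early as soon as the string can no longer reduce to 'P'.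
import Mathlib
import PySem

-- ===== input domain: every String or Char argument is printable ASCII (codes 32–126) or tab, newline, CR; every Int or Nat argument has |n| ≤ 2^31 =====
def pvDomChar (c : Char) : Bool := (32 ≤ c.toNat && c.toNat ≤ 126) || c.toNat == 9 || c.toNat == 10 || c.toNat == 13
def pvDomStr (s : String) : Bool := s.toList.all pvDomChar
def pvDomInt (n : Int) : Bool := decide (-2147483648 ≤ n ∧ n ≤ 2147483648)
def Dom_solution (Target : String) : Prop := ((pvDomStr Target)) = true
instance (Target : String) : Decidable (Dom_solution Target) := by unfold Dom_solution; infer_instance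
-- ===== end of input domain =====

-- B replaces A's explicit character stack by a one-pass counter automaton
-- (count of trailing 'P's + a pending-'A' flag) with early rejection; objective: simpler.

-- ===== PORT A =====
-- one iteration of A's for-loop body: append t, then reduce if ls[-4:] == ['P','P','A','P']
def stepA (ls : List Char) (t : Char) : List Char :=
  let ls1 := ls ++ [t]
  if PySem.List.slice ls1 (some (-4)) none = ['P', 'P', 'A', 'P'] then
    -- "for _ in range(3): ls.pop()": ls is nonempty here, so each pop() drops the last element (exact)
    ls1.dropLast.dropLast.dropLast
  else ls1

def solution (Target : String) : Bool :=
  if Target = "P" ∨ Target = "PPAP" then true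
  else
    let ls := List.foldl stepA [] Target.toList
    if ls = ['P'] ∨ ls = ['P', 'P', 'A', 'P'] then true else false

-- ===== PORT B =====
-- B's for-loop with its early returns, as structural recursion over the remaining characters
def altLoop (cnt : Int) (pending : Bool) : List Char → Bool
  | [] => !pending && (cnt == 1)
  | c :: rest =>
    if pending then
      if c = 'P' then altLoop (cnt - 1) false rest else false
    else if c = 'P' then altLoop (cnt + 1) pending rest
    else if c = 'A' then
      if 2 ≤ cnt then altLoop cnt true rest else false
    else false

def solution_alt (Target : String) : Bool := altLoop 0 false Target.toList

-- ===== PRECONDITION & SPEC =====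
def Spec_solution (Target : String) (out : Bool) : Prop := out = solution_alt Target
instance (Target : String) (out : Bool) : Decidable (Spec_solution Target out) := by unfold Spec_solution; infer_instance

-- ===== CLAIM (what is proved, stated in full; the proofs are below) =====
def Claim_equal_solution : Prop := ∀ (Target : String), Dom_solution Target → Spec_solution Target (solution Target)

-- ===== LEMMAS AND PROOFS =====

-- the stack shape A maintains while B's counter automaton is still alive
def stk (cnt : ℕ) (p : Bool) : List Char :=
  List.replicate cnt 'P' ++ (if p then ['A'] else [])

-- a "doomed" block: once the stack starts with such a prefix, no later reduction removes it
def BadU (u : List Char) : Prop :=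
  (u.getLast? ≠ none ∧ u.getLast? ≠ some 'P' ∧ u.getLast? ≠ some 'A') ∨
  (u.getLast? = some 'A' ∧ ¬ (['P', 'P', 'A'] <:+ u))

lemma last_ne {l₁ l₂ : List Char} {a b : Char} (h : l₁ ++ [a] = l₂ ++ [b]) (hne : a ≠ b) :
    False := by
  have h2 := congrArg List.getLast? h
  simp at h2
  exact hne h2

lemma concat_inj {l₁ l₂ : List Char} {a b : Char} (h : l₁ ++ [a] = l₂ ++ [b]) :
    l₁ = l₂ ∧ a = b := by
  have := List.append_inj' h rfl
  simpa using this

lemma cond_iff (l : List Char) :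
    PySem.List.slice l (some (-4)) none = ['P', 'P', 'A', 'P'] ↔
      ∃ w, l = w ++ ['P', 'P', 'A', 'P'] := by
  rw [PySem.List.slice_from_neg_ofNat l 4 (by omega)]
  constructor
  · intro h
    refine ⟨l.take (l.length - 4), ?_⟩
    rw [← h]; exact (List.take_append_drop _ _).symm
  · rintro ⟨w, rfl⟩
    have hl : (w ++ ['P', 'P', 'A', 'P']).length - 4 = w.length := by simp
    rw [hl, List.drop_left]

lemma stepA_red (s : List Char) (c : Char) (w : List Char)
    (h : s ++ [c] = w ++ ['P', 'P', 'A', 'P']) : stepA s c = w ++ ['P'] := by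
  unfold stepA
  rw [if_pos ((cond_iff _).2 ⟨w, h⟩), h]
  simp

lemma stepA_nored (s : List Char) (c : Char)
    (h : ∀ w, s ++ [c] ≠ w ++ ['P', 'P', 'A', 'P']) : stepA s c = s ++ [c] := by
  unfold stepA
  rw [if_neg]
  intro hc
  obtain ⟨w, hw⟩ := (cond_iff _).1 hc
  exact h w hw

lemma bad_step (u s : List Char) (c : Char) (hb : BadU u) (hp : u <+: s) :
    u <+: stepA s c := by
  by_cases hred : ∃ w, s ++ [c] = w ++ ['P', 'P', 'A', 'P']
  · obtain ⟨w, hw⟩ := hred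
    rw [stepA_red s c w hw]
    have hw' : s ++ [c] = (w ++ ['P', 'P', 'A']) ++ ['P'] := by simp [hw]
    obtain ⟨hs, hc⟩ := concat_inj hw'
    rw [hs] at hp
    by_cases hl : u.length ≤ (w ++ ['P']).length
    · have h1 : u <+: (w ++ ['P']) ++ ['P', 'A'] := by simpa [List.append_assoc] using hp
      exact List.prefix_of_prefix_length_le h1 (List.prefix_append _ _) hl
    · exfalso
      obtain ⟨v, hv⟩ := hp
      have hlen := congrArg List.length hv
      simp at hlen hl
      rcases v with _ | ⟨x, _ | ⟨y, v⟩⟩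
      · -- u = w ++ ['P','P','A']
        simp at hv
        rcases hb with ⟨_, _, hA⟩ | ⟨_, hno⟩
        · apply hA
          rw [hv]
          simp
        · exact hno ⟨w, hv.symm⟩
      · -- u ++ [x] = w ++ ['P','P','A']
        have hv' : u ++ [x] = (w ++ ['P', 'P']) ++ ['A'] := by
          simpa [List.append_assoc] using hv
        obtain ⟨hu, hx⟩ := concat_inj hv'
        rcases hb with ⟨_, hP, _⟩ | ⟨hA, _⟩
        · apply hP; rw [hu]; simp
        · rw [hu] at hA; simp at hA
      · simp at hlen
        omega
  · rw [stepA_nored s c (fun w hw => hred ⟨w, hw⟩)]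
    exact hp.trans (List.prefix_append _ _)

lemma bad_final (u f : List Char) (hb : BadU u) (hp : u <+: f) :
    ¬ (f = ['P'] ∨ f = ['P', 'P', 'A', 'P']) := by
  have hne : u ≠ [] := by
    rcases hb with ⟨h, _⟩ | ⟨h, _⟩ <;> intro he <;> subst he <;> simp at h
  rintro (rfl | rfl)
  · have := List.prefix_iff_eq_take.mp hp
    have hl : u.length ≤ 1 := by simpa using hp.length_le
    interval_cases h : u.length
    · exact hne (List.length_eq_zero_iff.mp h)
    · simp at this
      subst this
      rcases hb with ⟨_, hP, _⟩ | ⟨hA, _⟩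
      · exact hP rfl
      · simp at hA
  · have := List.prefix_iff_eq_take.mp hp
    have hl : u.length ≤ 4 := by simpa using hp.length_le
    interval_cases h : u.length
    · exact hne (List.length_eq_zero_iff.mp h)
    · simp at this; subst this
      rcases hb with ⟨_, hP, _⟩ | ⟨hA, _⟩
      · exact hP rfl
      · simp at hA
    · simp at this; subst this
      rcases hb with ⟨_, hP, _⟩ | ⟨hA, _⟩
      · exact hP rfl
      · simp at hA
    · simp at this; subst this
      rcases hb with ⟨_, _, hA⟩ | ⟨_, hno⟩
      · exact hA rfl
      · exact hno ⟨[], rfl⟩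
    · simp at this; subst this
      rcases hb with ⟨_, hP, _⟩ | ⟨hA, _⟩
      · exact hP rfl
      · simp at hA

lemma dead (l : List Char) (s u : List Char) (hb : BadU u) (hp : u <+: s) :
    ¬ (List.foldl stepA s l = ['P'] ∨ List.foldl stepA s l = ['P', 'P', 'A', 'P']) := by
  induction l generalizing s with
  | nil => exact bad_final u s hb hp
  | cons c l ih => exact ih (stepA s c) (bad_step u s c hb hp)

lemma rep_ne (cnt : ℕ) (w : List Char) :
    List.replicate cnt 'P' ≠ w ++ ['P', 'P', 'A', 'P'] := by
  intro h
  have hm : 'A' ∈ List.replicate cnt 'P' := by rw [h]; simp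
  have := List.eq_of_mem_replicate hm
  simp at this

lemma altLoop_cons (cnt : Int) (pending : Bool) (c : Char) (rest : List Char) :
    altLoop cnt pending (c :: rest) =
      (if pending then
        if c = 'P' then altLoop (cnt - 1) false rest else false
      else if c = 'P' then altLoop (cnt + 1) pending rest
      else if c = 'A' then
        if 2 ≤ cnt then altLoop cnt true rest else false
      else false) := rfl

lemma live (l : List Char) (cnt : ℕ) (p : Bool) (hpc : p = true → 2 ≤ cnt) :
    (if (List.foldl stepA (stk cnt p) l = ['P'] ∨
         List.foldl stepA (stk cnt p) l = ['P', 'P', 'A', 'P']) then true else false)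
      = altLoop (cnt : Int) p l := by
  induction l generalizing cnt p with
  | nil =>
    cases p with
    | false =>
      simp only [stk, if_neg Bool.false_ne_true, List.append_nil, List.foldl, altLoop]
      by_cases hc : cnt = 1
      · subst hc
        simp
      · rw [if_neg]
        · symm
          simp
          omega
        · rintro (h | h)
          · have := congrArg List.length h; simp at this; exact hc this
          · exact rep_ne cnt [] (by simpa using h)
    | true =>
      have h2 := hpc rfl
      simp only [stk, List.foldl, altLoop]
      rw [if_neg]
      · simp
      · rintro (h | h)
        · rcases cnt with _ | n
          · simp at h2
          · simp [List.replicate_succ] at h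
        · have h' : List.replicate cnt 'P' ++ ['A'] = ['P', 'P', 'A'] ++ ['P'] := by
            simpa using h
          exact last_ne h' (by decide)
  | cons c l ih =>
    cases p with
    | true =>
      have h2 := hpc rfl
      simp only [List.foldl]
      by_cases hc : c = 'P'
      · subst hc
        have hsp : stk cnt true ++ ['P'] =
            List.replicate (cnt - 2) 'P' ++ ['P', 'P', 'A', 'P'] := by
          have hc2 : cnt = (cnt - 2) + 2 := by omega
          simp only [stk]
          rw [hc2, List.replicate_add]
          simp
        have hst : stepA (stk cnt true) 'P' = stk (cnt - 1) false := by
          rw [stepA_red _ _ _ hsp]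
          have hc1 : cnt - 1 = (cnt - 2) + 1 := by omega
          simp [stk, hc1, List.replicate_add]
        simp only [hst, ih (cnt - 1) false (by simp), altLoop_cons]
        simp only [if_true]
        congr 1
        omega
      · have hst : stepA (stk cnt true) c = (stk cnt true) ++ [c] := by
          apply stepA_nored
          intro w hw
          have hw' : (stk cnt true) ++ [c] = (w ++ ['P', 'P', 'A']) ++ ['P'] := by
            simpa [List.append_assoc] using hw
          exact last_ne hw' hc
        have hbad : BadU (stk cnt true ++ [c]) := by
          by_cases ha : c = 'A'
          · subst ha
            right
            constructor
            · simp
            · rintro ⟨t, ht⟩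
              have ht' : (stk cnt true) ++ ['A'] = (t ++ ['P', 'P']) ++ ['A'] := by
                simpa [List.append_assoc] using ht.symm
              have hps : stk cnt true = t ++ ['P', 'P'] := (concat_inj ht').1
              have hps' : List.replicate cnt 'P' ++ ['A'] = (t ++ ['P']) ++ ['P'] := by
                simpa [stk, List.append_assoc] using hps
              exact last_ne hps' (by decide)
          · left
            refine ⟨by simp, ?_, ?_⟩ <;> simp [hc, ha]
        simp only [hst]
        rw [if_neg (dead l _ _ hbad (List.prefix_refl _))]
        simp [altLoop_cons, hc]
    | false =>
      simp only [List.foldl]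
      by_cases hc : c = 'P'
      · subst hc
        have hst : stepA (stk cnt false) 'P' = stk (cnt + 1) false := by
          rw [stepA_nored]
          · simp [stk, List.replicate_succ']
          · intro w hw
            apply rep_ne (cnt + 1) w
            rw [List.replicate_succ']
            simpa [stk] using hw
        simp only [hst, ih (cnt + 1) false (by simp), altLoop_cons,
          if_neg Bool.false_ne_true]
        push_cast
        rfl
      · have hnored : ∀ w, stk cnt false ++ [c] ≠ w ++ ['P', 'P', 'A', 'P'] := by
          intro w hw
          have hw' : (stk cnt false) ++ [c] = (w ++ ['P', 'P', 'A']) ++ ['P'] := by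
            simpa [List.append_assoc] using hw
          exact last_ne hw' hc
        have hst : stepA (stk cnt false) c = (stk cnt false) ++ [c] :=
          stepA_nored _ _ hnored
        by_cases ha : c = 'A'
        · subst ha
          by_cases h2 : 2 ≤ cnt
          · have hst2 : stepA (stk cnt false) 'A' = stk cnt true := by
              rw [hst]; simp [stk]
            simp only [hst2, ih cnt true (fun _ => h2), altLoop_cons,
              if_neg Bool.false_ne_true, if_neg (by decide : ¬('A' = 'P'))]
            have h2' : (2 : ℤ) ≤ (cnt : ℤ) := by exact_mod_cast h2
            simp [h2']
          · have hbad : BadU (stk cnt false ++ ['A']) := by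
              right
              constructor
              · simp
              · rintro ⟨t, ht⟩
                have hlen := congrArg List.length ht
                simp [stk] at hlen
                omega
            simp only [hst]
            rw [if_neg (dead l _ _ hbad (List.prefix_refl _))]
            simp only [altLoop_cons, if_neg Bool.false_ne_true,
              if_neg (by decide : ¬('A' = 'P'))]
            have h2' : ¬ ((2 : ℤ) ≤ (cnt : ℤ)) := by exact_mod_cast h2
            simp [h2']
        · have hbad : BadU (stk cnt false ++ [c]) := by
            left
            refine ⟨by simp, ?_, ?_⟩ <;> simp [hc, ha]
          simp only [hst]
          rw [if_neg (dead l _ _ hbad (List.prefix_refl _))]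
          simp [altLoop_cons, hc, ha]

-- ===== VERDICT (by name: the statement is the Claim_ definition above) =====
theorem solution_spec : Claim_equal_solution := by
  intro T _
  unfold Spec_solution solution solution_alt
  by_cases hg : T = "P" ∨ T = "PPAP"
  · rw [if_pos hg]
    rcases hg with hg | hg <;> subst hg <;> decide
  · rw [if_neg hg]
    have h := live T.toList 0 false (by simp)
    simpa [stk] using h
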